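-- pv_equiv track=rewrite | github.com/OnkarJadhav3009/Projects-And-Accomplishments | Applied Algorithms/Assignments/Assignment_7/AA_Assignment_7-1.py | additional_seats
-- ===== SOURCE A (Python) =====
-- import heapq
--
-- def additional_seats(k, h):
--     waiting = []
--     travelling = []
--     c = 0
--     for i in h:
--         heapq.heappush(travelling, i)
--
--     while travelling:
--         curr = heapq.heappop(travelling)
--         c += 1
--         heapq.heappush(waiting, curr[1])
--         m = heapq.heappop(waiting)
--         if curr[0] >= m:
--             c -= 1
--         else:
--             heapq.heappush(waiting, m)
--
--     if c - k < 0: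
--         return 0
--     else:
--         return c - k
-- ===== SOURCE B (Python) =====
-- def additional_seats(k, h):
--     # Direct max-overlap formula instead of simulating room allocation with heaps:
--     # over the sorted meeting list, the answer is the maximum over prefixes of
--     # (prefix length - number of prefix end-times <= current start), minus k, floored at 0.
--     order = sorted(h)
--     best = 0
--     for t, iv in enumerate(order):
--         s = iv[0]
--         d = sum(1 for jv in order[:t + 1] if jv[1] <= s)
--         best = max(best, t + 1 - d)
--     return max(0, best - k)
-- ===== Notes on version B (the rewrite author's own statement) =====
-- stated objective: simpler
-- what changed: Replaces the two-heap room-allocation simulation (push/pop of travelling and waiting heaps with a seat counter freed on reuse) by a direct formula: over the sorted meeting list, the answer is max over prefixes of (prefix length - number of prefix end-times <= current start), minus k, floored at 0.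
import Mathlib
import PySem

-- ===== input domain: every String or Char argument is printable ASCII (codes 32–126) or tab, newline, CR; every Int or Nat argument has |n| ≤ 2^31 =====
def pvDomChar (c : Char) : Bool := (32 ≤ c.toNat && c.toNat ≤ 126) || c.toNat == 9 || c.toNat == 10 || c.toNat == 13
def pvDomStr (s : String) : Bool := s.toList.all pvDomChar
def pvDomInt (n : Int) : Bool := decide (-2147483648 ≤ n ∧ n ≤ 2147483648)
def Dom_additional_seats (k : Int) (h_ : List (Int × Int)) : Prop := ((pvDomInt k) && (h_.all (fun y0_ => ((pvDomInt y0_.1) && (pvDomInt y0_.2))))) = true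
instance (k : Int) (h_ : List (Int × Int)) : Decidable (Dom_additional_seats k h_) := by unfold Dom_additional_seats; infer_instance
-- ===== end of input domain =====

-- B replaces A's two-heap room-allocation simulation by a direct prefix-counting
-- maximum formula over the sorted meeting list (objective: simpler).

-- ===== PORT A =====
-- Python's heapq heaps are observed only through heappop (= extract minimum), so each
-- heap is modeled exactly by a sorted list: heappush = ordered insert (PySem.List.insertBy
-- with Python's comparison), heappop = take the head.  pyTupLt is Python's `<` on int pairs.
def pyTupLt (a b : Int × Int) : Bool :=
  decide (a.1 < b.1) || (!decide (b.1 < a.1) && decide (a.2 < b.2))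

def heappushT (t : List (Int × Int)) (i : Int × Int) : List (Int × Int) :=
  PySem.List.insertBy pyTupLt i t

def heappushW (w : List Int) (e : Int) : List Int :=
  PySem.List.insertBy (fun a b => decide (a < b)) e w

-- the `while travelling:` loop; state = (travelling, waiting, c)
def aLoop : List (Int × Int) → List Int → Int → Int
  | [], _waiting, c => c
  | curr :: rest, waiting, c =>
      match heappushW waiting curr.2 with   -- heappush(waiting, curr[1]); m = heappop(waiting)
      | [] => c + 1                          -- unreachable: a push never yields an empty heap
      | m :: w' =>
          if curr.1 ≥ m then aLoop rest w' (c + 1 - 1)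
          else aLoop rest (heappushW w' m) (c + 1)

def additional_seats (k : Int) (h_ : List (Int × Int)) : Int :=
  let travelling := h_.foldl heappushT []
  let c := aLoop travelling [] 0
  if c - k < 0 then 0 else c - k

-- ===== PORT B =====
def additional_seats_alt (k : Int) (h_ : List (Int × Int)) : Int :=
  let order := PySem.List.sorted2 h_ Prod.fst Prod.snd
  let best := (PySem.List.enumerate order).foldl
    (fun best ti =>
      let s := ti.2.1
      let d : Int := ((PySem.List.slice order none (some (ti.1 + 1))).countP
        (fun jv => decide (jv.2 ≤ s)) : Nat)
      max best (ti.1 + 1 - d)) 0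
  max 0 (best - k)

-- ===== PRECONDITION & SPEC =====
def Spec_additional_seats (k : Int) (h_ : List (Int × Int)) (out : Int) : Prop := out = additional_seats_alt k h_
instance (k : Int) (h_ : List (Int × Int)) (out : Int) : Decidable (Spec_additional_seats k h_ out) := by unfold Spec_additional_seats; infer_instance

-- ===== CLAIM (what is proved, stated in full; the proofs are below) =====
def Claim_equal_additional_seats : Prop := ∀ (k : Int) (h_ : List (Int × Int)), Dom_additional_seats k h_ → Spec_additional_seats k h_ (additional_seats k h_)

-- ===== LEMMAS AND PROOFS =====

theorem insertBy_perm {α : Type} (before : α → α → Bool) (x : α) :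
    ∀ l : List α, (PySem.List.insertBy before x l).Perm (x :: l) := by
  intro l
  induction l with
  | nil => simp [PySem.List.insertBy]
  | cons y ys ih =>
      by_cases hb : before x y = true
      · simp [PySem.List.insertBy, hb]
      · simp only [PySem.List.insertBy, Bool.not_eq_true] at *
        simp [hb]
        exact (ih.cons y).trans (List.Perm.swap x y ys)

theorem insertBy_pairwise {α : Type} (before : α → α → Bool) (R : α → α → Prop)
    (h1 : ∀ a b, before a b = true → R a b)
    (h2 : ∀ a b, before a b = false → R b a)
    (h3 : ∀ a b c, R a b → R b c → R a c) :
    ∀ (l : List α) (x : α), l.Pairwise R → (PySem.List.insertBy before x l).Pairwise R := by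
  intro l
  induction l with
  | nil => intro x _; simp [PySem.List.insertBy]
  | cons y ys ih =>
      intro x hp
      rw [List.pairwise_cons] at hp
      by_cases hb : before x y = true
      · simp only [PySem.List.insertBy, hb, if_true]
        refine List.Pairwise.cons ?_ (List.Pairwise.cons hp.1 hp.2)
        intro z hz
        rcases List.mem_cons.mp hz with rfl | hz
        · exact h1 _ _ hb
        · exact h3 _ _ _ (h1 _ _ hb) (hp.1 z hz)
      · have hb' : before x y = false := by simpa using hb
        simp only [PySem.List.insertBy, hb']
        refine List.Pairwise.cons ?_ (ih x hp.2)
        intro z hz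
        rcases (PySem.List.mem_insertBy before x z ys).mp hz with rfl | hz
        · exact h2 _ _ hb'
        · exact hp.1 z hz

theorem pushW_pairwise (w : List Int) (e : Int) (hw : w.Pairwise (· ≤ ·)) :
    (heappushW w e).Pairwise (· ≤ ·) := by
  refine insertBy_pairwise _ _ ?_ ?_ ?_ w e hw
  · intro a b hab; simp at hab; omega
  · intro a b hab; simp at hab; omega
  · intro a b c; omega

theorem pushT_pairwise_fst (t : List (Int × Int)) (i : Int × Int)
    (ht : t.Pairwise (fun a b => a.1 ≤ b.1)) :
    (heappushT t i).Pairwise (fun a b => a.1 ≤ b.1) := by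
  refine insertBy_pairwise _ _ ?_ ?_ ?_ t i ht
  · intro a b hab; simp [pyTupLt] at hab; omega
  · intro a b hab; simp [pyTupLt] at hab; omega
  · intro a b c; exact fun h1 h2 => le_trans h1 h2

theorem foldl_pushT_pairwise (h_ : List (Int × Int)) :
    ∀ acc : List (Int × Int), acc.Pairwise (fun a b => a.1 ≤ b.1) →
      (h_.foldl heappushT acc).Pairwise (fun a b => a.1 ≤ b.1) := by
  induction h_ with
  | nil => intro acc hacc; simpa using hacc
  | cons i rest ih =>
      intro acc hacc
      exact ih _ (pushT_pairwise_fst acc i hacc)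

-- B's fold, rewritten as a recursion with a Nat position (proof helper)
def bRun (Lf : List (Int × Int)) : Int → Nat → List (Int × Int) → Int
  | c, _, [] => c
  | c, t, i :: R =>
      bRun Lf (max c ((t : Int) + 1 -
        (((Lf.take (t + 1)).countP (fun jv => decide (jv.2 ≤ i.1)) : Nat) : Int))) (t + 1) R

theorem bridge (Lf : List (Int × Int)) :
    ∀ (R : List (Int × Int)) (t : Nat) (c : Int),
      (PySem.List.enumerate R (t : Int)).foldl
        (fun best ti =>
          let s := ti.2.1
          let d : Int := ((PySem.List.slice Lf none (some (ti.1 + 1))).countP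
            (fun jv => decide (jv.2 ≤ s)) : Nat)
          max best (ti.1 + 1 - d)) c = bRun Lf c t R := by
  intro R
  induction R with
  | nil => intro t c; simp [PySem.List.enumerate, bRun]
  | cons i R ih =>
      intro t c
      rw [PySem.List.enumerate_cons]
      simp only [List.foldl_cons]
      have hc : ((t : Int) + 1) = ((t + 1 : Nat) : Int) := by push_cast; ring
      rw [hc, ih (t + 1)]
      rw [bRun]
      congr 2
      rw [PySem.List.slice_to] <;> first | omega | simp

theorem main_loop (L : List (Int × Int)) (hL : L.Pairwise (fun a b => a.1 ≤ b.1)) :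
    ∀ (R P : List (Int × Int)) (W F : List Int) (c : Int),
      L = P ++ R →
      W.Pairwise (· ≤ ·) →
      (P.map Prod.snd).Perm (W ++ F) →
      (∀ x ∈ F, ∀ r ∈ R, x ≤ r.1) →
      c = (W.length : Int) →
      aLoop R W c = bRun L c P.length R := by
  intro R
  induction R with
  | nil => intro P W F c _ _ _ _ _; simp [aLoop, bRun]
  | cons i R' ih =>
      intro P W F c hLPR hWs hperm hF hc
      have hpp : (heappushW W i.2).Perm (i.2 :: W) :=
        insertBy_perm (fun a b => decide (a < b)) i.2 W
      have hne : heappushW W i.2 ≠ [] := by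
        intro h0
        have := hpp.length_eq
        rw [h0] at this
        simp at this
      obtain ⟨m, w', hW1⟩ : ∃ m w', heappushW W i.2 = m :: w' := by
        cases hE : heappushW W i.2 with
        | nil => exact absurd hE hne
        | cons m w' => exact ⟨m, w', rfl⟩
      have hW1s : (m :: w').Pairwise (· ≤ ·) := hW1 ▸ pushW_pairwise W i.2 hWs
      have hW1perm : (m :: w').Perm (i.2 :: W) := hW1 ▸ hpp
      have hw's : w'.Pairwise (· ≤ ·) := (List.pairwise_cons.mp hW1s).2
      have hiR : ∀ r ∈ R', i.1 ≤ r.1 := by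
        have := (List.pairwise_append.mp (hLPR ▸ hL)).2.1
        exact (List.pairwise_cons.mp this).1
      have htake : L.take (P.length + 1) = P ++ [i] := by
        rw [hLPR, List.take_append]
        simp
      have hlen1 : w'.length = W.length := by
        have := hW1perm.length_eq
        simpa using this
      set q : Int → Bool := fun x => decide (x ≤ i.1) with hq
      have hcount : ((P ++ [i]).countP (fun jv => decide (jv.2 ≤ i.1)) : Int)
          = (W.countP q : Int) + (F.length : Int) + (if i.2 ≤ i.1 then 1 else 0) := by
        have h1 : (P ++ [i]).countP (fun jv => decide (jv.2 ≤ i.1))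
            = ((P ++ [i]).map Prod.snd).countP q := by
          rw [List.countP_map]; rfl
        have h2 : ((P ++ [i]).map Prod.snd).Perm ((i.2 :: W) ++ F) := by
          rw [List.map_append]
          refine (hperm.append_right _).trans ?_
          exact (List.perm_append_singleton i.2 (W ++ F))
        have h4 : F.countP q = F.length :=
          List.countP_eq_length.mpr (fun x hx => by
            simp only [hq, decide_eq_true_eq]
            exact hF x hx i List.mem_cons_self)
        rw [h1, h2.countP_eq q, List.countP_append, List.countP_cons, h4]
        by_cases hi : i.2 ≤ i.1 <;> simp [hq, hi] <;> push_cast <;> ring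
      have hlenP : (P.length : Int) = (W.length : Int) + (F.length : Int) := by
        have := hperm.length_eq
        simp at this
        omega
      rw [bRun, htake, hcount]
      simp only [aLoop, hW1]
      by_cases hfree : i.1 ≥ m
      · -- a seat is reused: c is unchanged and the new term is ≤ c
        have hcnt_pos : 0 < (i.2 :: W).countP q := by
          have hqm : q m = true := by simp [hq]; omega
          have hm : 0 < (m :: w').countP q := by
            simp [hqm]
          rwa [hW1perm.countP_eq q] at hm
        have hsplit : (i.2 :: W).countP q = W.countP q + (if i.2 ≤ i.1 then 1 else 0) := by
          rw [List.countP_cons]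
          by_cases hi : i.2 ≤ i.1 <;> simp [hq, hi]
        have hterm : max c ((P.length : Int) + 1 -
            ((W.countP q : Int) + (F.length : Int) + (if i.2 ≤ i.1 then 1 else 0))) = c := by
          rw [hlenP, hc]
          have h6 : 0 < W.countP q + (if i.2 ≤ i.1 then 1 else 0) := hsplit ▸ hcnt_pos
          by_cases hi : i.2 ≤ i.1 <;> simp [hi] at h6 ⊢ <;> omega
        rw [if_pos hfree, hterm]
        have hc' : c + 1 - 1 = c := by ring
        rw [hc']
        have := ih (P ++ [i]) w' (m :: F) c
          (by rw [hLPR]; simp)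
          hw's
          (by
            rw [List.map_append]
            refine (hperm.append_right _).trans ?_
            refine (List.perm_append_singleton i.2 (W ++ F)).trans ?_
            refine ((hW1perm.symm).append_right F).trans ?_
            exact List.perm_middle.symm)
          (by
            intro x hx r hr
            rcases List.mem_cons.mp hx with rfl | hx
            · exact le_trans hfree (hiR r hr)
            · exact hF x hx r (List.mem_cons_of_mem i hr))
          (by rw [hlen1]; exact hc)
        rw [this]
        congr 1
        simp
      · -- no seat can be reused: c grows by 1 and the new term is exactly c + 1
        have hm_lt : i.1 < m := by omega
        have hcnt0 : (i.2 :: W).countP q = 0 := by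
          rw [← hW1perm.countP_eq q]
          rw [List.countP_eq_zero]
          intro x hx
          have hmx : m ≤ x := by
            rcases List.mem_cons.mp hx with rfl | hx
            · exact le_rfl
            · exact (List.pairwise_cons.mp hW1s).1 x hx
          simp [hq]
          omega
        have hW0 : W.countP q = 0 ∧ ¬ (i.2 ≤ i.1) := by
          rw [List.countP_cons] at hcnt0
          by_cases hi : i.2 ≤ i.1
          · simp [hq, hi] at hcnt0
          · exact ⟨by simpa [hq, hi] using hcnt0, hi⟩
        have hterm : max c ((P.length : Int) + 1 -
            ((W.countP q : Int) + (F.length : Int) + (if i.2 ≤ i.1 then 1 else 0))) = c + 1 := by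
          rw [hlenP, hc, hW0.1, if_neg hW0.2]
          push_cast
          omega
        rw [if_neg hfree, hterm]
        have hpp2 : (heappushW w' m).Perm (m :: w') :=
          insertBy_perm (fun a b => decide (a < b)) m w'
        have := ih (P ++ [i]) (heappushW w' m) F (c + 1)
          (by rw [hLPR]; simp)
          (pushW_pairwise w' m hw's)
          (by
            rw [List.map_append]
            refine (hperm.append_right _).trans ?_
            refine (List.perm_append_singleton i.2 (W ++ F)).trans ?_
            refine ((hW1perm.symm).append_right F).trans ?_
            exact (hpp2.symm).append_right F)
          (by intro x hx r hr; exact hF x hx r (List.mem_cons_of_mem i hr))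
          (by
            have h5 : (heappushW w' m).length = W.length + 1 := by
              rw [hpp2.length_eq]
              simp [hlen1]
            rw [hc, h5]
            push_cast
            ring)
        rw [this]
        congr 1
        simp

-- ===== VERDICT (by name: the statement is the Claim_ definition above) =====
theorem additional_seats_spec : Claim_equal_additional_seats := by
  unfold Claim_equal_additional_seats
  intro k h_ _
  unfold Spec_additional_seats additional_seats additional_seats_alt
  have horder : h_.foldl heappushT [] = PySem.List.sorted2 h_ Prod.fst Prod.snd := rfl
  set L := h_.foldl heappushT [] with hLdef
  have hps : L.Pairwise (fun a b => a.1 ≤ b.1) := foldl_pushT_pairwise h_ [] (by simp)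
  have hmain : aLoop L [] 0 = bRun L 0 0 L :=
    main_loop L hps L [] [] [] 0 rfl (by simp) (by simp) (by simp) (by simp)
  have hbridge := bridge L L 0 0
  simp only [← horder]
  rw [hmain]
  norm_num at hbridge
  rw [← hbridge]
  split_ifs <;> omega
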